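-- pv_equiv track=rewrite | github.com/CompetitiveCodingLeetcode/LeetcodeEasy | Sorting/SortThePeople_Q2418.py | sortPeople
-- ===== SOURCE A (Python) =====
-- from typing import List
--
-- def sortPeople(names: List[str], heights: List[int]) -> List[str]:
--     name_height_list = []
--     for i in range(0, len(names)):
--         name_height_list.append([heights[i], names[i]])
--     name_height_list = sorted(name_height_list, key=lambda x: x[0], reverse=True)
--     idx = 0
--     for height_name in name_height_list:
--         heights[idx] = height_name[0]
--         names[idx] = height_name[1]
--         idx += 1
--     return names
-- ===== SOURCE B (Python) =====
-- def sortPeople(names, heights):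
--     # Group names into buckets keyed by height (dict keeps first-seen order),
--     # then emit the buckets by descending height; mutates names and heights like A.
--     buckets = {}
--     for h, name in zip(heights, names):
--         buckets[h] = buckets.get(h, []) + [name]
--     out = []
--     for h in sorted(buckets, reverse=True):
--         out += buckets[h]
--     names[:len(out)] = out
--     heights[:len(out)] = sorted(heights[:len(out)], reverse=True)
--     return names
-- ===== Notes on version B (the rewrite author's own statement) =====
-- stated objective: alternative
-- what changed: Replaces A's build-[height,name]-pairs / sort-all-pairs / index-write-back pipeline by bucketing: group names into a dict keyed by height in one pass, sort only the distinct heights descending, and concatenate the buckets; both arguments are still mutated in place.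
import Mathlib
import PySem

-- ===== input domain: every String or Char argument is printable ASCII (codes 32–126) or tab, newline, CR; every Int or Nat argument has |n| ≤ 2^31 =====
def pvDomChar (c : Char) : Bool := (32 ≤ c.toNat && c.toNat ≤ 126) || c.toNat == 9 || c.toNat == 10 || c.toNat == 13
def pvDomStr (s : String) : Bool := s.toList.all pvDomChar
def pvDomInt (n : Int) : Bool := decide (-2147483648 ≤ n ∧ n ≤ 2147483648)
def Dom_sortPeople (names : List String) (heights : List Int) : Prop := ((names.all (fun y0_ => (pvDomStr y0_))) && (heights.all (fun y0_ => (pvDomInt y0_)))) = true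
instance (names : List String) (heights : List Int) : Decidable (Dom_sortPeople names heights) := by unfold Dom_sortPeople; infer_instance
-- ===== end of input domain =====

-- B replaces A's pair-then-sort-then-write-back by bucketing: group names by height in a
-- dict, sort only the DISTINCT heights descending, and concatenate the buckets (objective:
-- alternative). Equivalence is about the RETURN value; both A and B mutate names and
-- heights in place the same way.

-- ===== PORT A =====
def sortPeople (names : List String) (heights : List Int) : List String :=
  -- name_height_list built by the append loop over range(0, len(names))
  let name_height_list :=
    (PySem.List.pyRange 0 (PySem.List.len names) 1).foldl
      (fun acc i => acc ++ [(PySem.List.pyGetD heights i 0, PySem.List.pyGetD names i "")]) []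
  let sortedList := PySem.List.sorted name_height_list (fun x => x.1) true
  -- write-back loop: idx starts at 0, each pair overwrites heights[idx], names[idx]
  let final := sortedList.foldl
      (fun (st : Nat × List Int × List String) p =>
        (st.1 + 1, st.2.1.set st.1 p.1, st.2.2.set st.1 p.2))
      (0, heights, names)
  final.2.2

-- ===== PORT B =====
def sortPeople_alt (names : List String) (heights : List Int) : List String :=
  -- buckets[h] = buckets.get(h, []) + [name]  over zip(heights, names)
  let buckets := (List.zip heights names).foldl
      (fun d p => d.modify p.1 [] (fun v => v ++ [p.2])) PySem.Dict.empty
  -- out += buckets[h]  for h in sorted(buckets, reverse=True)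
  let out := (PySem.List.sorted (PySem.Dict.keys buckets) (fun k => k) true).foldl
      (fun acc h => acc ++ buckets.getD h []) []
  -- names[:len(out)] = out; return names
  out ++ names.drop out.length

-- ===== PRECONDITION & SPEC =====
-- Pre_ excludes exactly the inputs where the Python A raises IndexError: heights shorter than names.
def Pre_sortPeople (names : List String) (heights : List Int) : Prop :=
  names.length ≤ heights.length
instance (names : List String) (heights : List Int) : Decidable (Pre_sortPeople names heights) := by unfold Pre_sortPeople; infer_instance
def pvWitness_sortPeople : List String × List Int := (["alice", "bob"], [150, 180])

def Spec_sortPeople (names : List String) (heights : List Int) (out : List String) : Prop := out = sortPeople_alt names heights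
instance (names : List String) (heights : List Int) (out : List String) : Decidable (Spec_sortPeople names heights out) := by unfold Spec_sortPeople; infer_instance

-- ===== CLAIM (what is proved, stated in full; the proofs are below) =====
def Claim_equal_sortPeople : Prop := ∀ (names : List String) (heights : List Int), Dom_sortPeople names heights → Pre_sortPeople names heights → Spec_sortPeople names heights (sortPeople names heights)

-- ===== LEMMAS AND PROOFS =====

theorem pv_insertBy_append (p : (Int × String) → (Int × String) → Bool) (x : Int × String)
    (as bs : List (Int × String)) (h : ∀ a ∈ as, p x a = false) :
    PySem.List.insertBy p x (as ++ bs) = as ++ PySem.List.insertBy p x bs := by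
  induction as with
  | nil => simp
  | cons a as ih =>
      have ha := h a (by simp)
      simp [PySem.List.insertBy, ha, ih (fun a' ha' => h a' (by simp [ha']))]

theorem pv_insert_mem (x : Int × String) (ks : List Int) (f : Int → List (Int × String))
    (hsort : ks.Pairwise (· > ·))
    (hhom : ∀ h ∈ ks, ∀ y ∈ f h, y.1 = h)
    (hc : x.1 ∈ ks) :
    PySem.List.insertBy (fun a b => decide (b.1 < a.1)) x (ks.flatMap f)
      = ks.flatMap (fun h => f h ++ if h = x.1 then [x] else []) := by
  induction ks with
  | nil => simp at hc
  | cons h t ih =>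
      rw [List.pairwise_cons] at hsort
      simp only [List.flatMap_cons]
      by_cases hx : h = x.1
      · rw [pv_insertBy_append _ _ _ _ (by
          intro a ha
          have h1 : a.1 = x.1 := (hhom h (by simp) a ha).trans hx
          simp [h1])]
        have hrest : PySem.List.insertBy (fun a b => decide (b.1 < a.1)) x (t.flatMap f)
            = x :: t.flatMap f := by
          cases hfl : t.flatMap f with
          | nil => simp [PySem.List.insertBy]
          | cons y ys =>
              have hy : y ∈ t.flatMap f := by rw [hfl]; simp
              obtain ⟨h', hh', hyf⟩ := List.mem_flatMap.mp hy
              have hk : y.1 = h' := hhom h' (by simp [hh']) y hyf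
              have hlt : y.1 < x.1 := by rw [hk, ← hx]; exact hsort.1 h' hh'
              simp [PySem.List.insertBy, hlt]
        rw [hrest]
        have hcongr : List.flatMap (fun h' => f h' ++ if h' = x.1 then [x] else []) t
            = List.flatMap f t := List.flatMap_congr (by
          intro h' hh'
          have : h' ≠ x.1 := by have := hsort.1 h' hh'; omega
          simp [this])
        rw [hcongr, if_pos hx]
        simp
      · have hct : x.1 ∈ t := by cases hc with
          | head => exact absurd rfl hx
          | tail _ hm => exact hm
        rw [pv_insertBy_append _ _ _ _ (by
          intro a ha
          have hk := hhom h (by simp) a ha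
          have : h > x.1 := hsort.1 x.1 hct
          simp [hk]; omega)]
        rw [ih hsort.2 (fun h' hh' => hhom h' (by simp [hh'])) hct]
        simp [hx]

theorem pv_insert_new (x : Int × String) (ks : List Int) (f : Int → List (Int × String))
    (hsort : ks.Pairwise (· > ·))
    (hne : ∀ h ∈ ks, f h ≠ [])
    (hhom : ∀ h ∈ ks, ∀ y ∈ f h, y.1 = h)
    (hc : x.1 ∉ ks) :
    PySem.List.insertBy (fun a b => decide (b.1 < a.1)) x (ks.flatMap f)
      = (PySem.List.insertBy (fun a b => decide (b < a)) x.1 ks).flatMap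
          (fun h => if h = x.1 then [x] else f h) := by
  induction ks with
  | nil => simp [PySem.List.insertBy]
  | cons h t ih =>
      rw [List.pairwise_cons] at hsort
      have hhx : h ≠ x.1 := fun he => hc (by simp [he])
      have hct : x.1 ∉ t := fun he => hc (by simp [he])
      have hcongr : List.flatMap (fun h' => if h' = x.1 then [x] else f h') t
          = List.flatMap f t := List.flatMap_congr (by
        intro h' hh'
        have : h' ≠ x.1 := fun he => hct (he ▸ hh')
        simp [this])
      by_cases hlt : h < x.1
      · have hfh := hne h (by simp)
        cases hfh' : f h with
        | nil => exact absurd hfh' hfh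
        | cons y ys =>
            have hk : y.1 = h := hhom h (by simp) y (by rw [hfh']; simp)
            have h1 : PySem.List.insertBy (fun a b => decide (b.1 < a.1)) x ((h::t).flatMap f)
                = x :: (h::t).flatMap f := by
              simp only [List.flatMap_cons, hfh', List.cons_append]
              have hyx : y.1 < x.1 := by rw [hk]; exact hlt
              simp [PySem.List.insertBy, hyx]
            have h2 : PySem.List.insertBy (fun a b => decide (b < a)) x.1 (h::t)
                = x.1 :: h :: t := by simp [PySem.List.insertBy, hlt]
            rw [h1, h2]
            simp only [List.flatMap_cons, hcongr]
            simp [hhx]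
      · have hgt : h > x.1 := by
          rcases lt_trichotomy h x.1 with h'|h'|h'
          · exact absurd h' hlt
          · exact absurd h' hhx
          · exact h'
        simp only [List.flatMap_cons]
        rw [pv_insertBy_append _ _ _ _ (by
          intro a ha
          have hk := hhom h (by simp) a ha
          simp [hk]; omega)]
        rw [ih hsort.2 (fun h' hh' => hne h' (by simp [hh'])) (fun h' hh' => hhom h' (by simp [hh'])) hct]
        have h2 : PySem.List.insertBy (fun a b => decide (b < a)) x.1 (h::t)
            = h :: PySem.List.insertBy (fun a b => decide (b < a)) x.1 t := by
          have : ¬ (h < x.1) := hlt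
          simp [PySem.List.insertBy, this]
        rw [h2]
        simp only [List.flatMap_cons, if_neg hhx]

theorem pv_grouped (l : List (Int × String)) :
    PySem.List.sorted l (fun p => p.1) true
      = (PySem.List.sorted (PySem.Set.ofList (l.map (fun p => p.1))) (fun k => k) true).flatMap
          (fun h => l.filter (fun p => p.1 == h)) := by
  induction l using List.reverseRecOn with
  | nil => simp [PySem.List.sorted_rev_eq_foldl_insertBy, PySem.Set.ofList]
  | append_singleton l x ih =>
      have hks_sort : (PySem.List.sorted (PySem.Set.ofList (l.map (fun p => p.1))) (fun k => k) true).Pairwise (· > ·) := by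
        have h1 := PySem.List.sorted_pairwise_rev (PySem.Set.ofList (l.map (fun p => p.1))) (fun k => k)
        have h2 : (PySem.List.sorted (PySem.Set.ofList (l.map (fun p => p.1))) (fun k => k) true).Nodup :=
          (PySem.List.sorted_perm _ _ _).nodup_iff.mpr (PySem.Set.nodup_ofList _)
        exact (h1.and h2).imp (by intro a b hab; exact lt_of_le_of_ne hab.1 (Ne.symm hab.2))
      have hmemks : ∀ h, h ∈ PySem.List.sorted (PySem.Set.ofList (l.map (fun p => p.1))) (fun k => k) true ↔ h ∈ l.map (fun p => p.1) := by
        intro h; rw [PySem.List.mem_sorted, PySem.Set.mem_ofList]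
      have hhom : ∀ h ∈ PySem.List.sorted (PySem.Set.ofList (l.map (fun p => p.1))) (fun k => k) true,
          ∀ y ∈ l.filter (fun p => p.1 == h), y.1 = h := by
        intro h _ y hy
        have := (List.mem_filter.mp hy).2
        simpa using this
      have hne : ∀ h ∈ PySem.List.sorted (PySem.Set.ofList (l.map (fun p => p.1))) (fun k => k) true,
          l.filter (fun p => p.1 == h) ≠ [] := by
        intro h hh
        rw [hmemks] at hh
        obtain ⟨p, hp, hp1⟩ := List.mem_map.mp hh
        exact List.ne_nil_of_mem (List.mem_filter.mpr ⟨hp, by simp [hp1]⟩)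
      have hL : PySem.List.sorted (l ++ [x]) (fun p => p.1) true
          = PySem.List.insertBy (fun a b => decide (b.1 < a.1)) x (PySem.List.sorted l (fun p => p.1) true) := by
        rw [PySem.List.sorted_rev_eq_foldl_insertBy, PySem.List.sorted_rev_eq_foldl_insertBy, List.foldl_append]
        rfl
      rw [hL, ih]
      by_cases hx : x.1 ∈ l.map (fun p => p.1)
      · have hadd : PySem.Set.ofList ((l ++ [x]).map (fun p => p.1))
            = PySem.Set.ofList (l.map (fun p => p.1)) := by
          rw [List.map_append, PySem.Set.ofList_eq_foldl, List.foldl_append, ← PySem.Set.ofList_eq_foldl]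
          have : x.1 ∈ PySem.Set.ofList (l.map (fun p => p.1)) := (PySem.Set.mem_ofList _ _).mpr hx
          simp [PySem.Set.add, PySem.Set.contains, this]
        rw [hadd, pv_insert_mem x _ _ hks_sort hhom ((hmemks x.1).mpr hx)]
        apply List.flatMap_congr
        intro h _
        rw [List.filter_append]
        rw [List.filter_singleton]
        by_cases hh : h = x.1
        · simp [hh]
        · have hbe : (x.1 == h) = false := by simp; omega
          simp [hh, hbe]
      · have hxS : x.1 ∉ PySem.Set.ofList (l.map (fun p => p.1)) := fun hm => hx ((PySem.Set.mem_ofList _ _).mp hm)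
        have hadd : PySem.Set.ofList ((l ++ [x]).map (fun p => p.1))
            = PySem.Set.ofList (l.map (fun p => p.1)) ++ [x.1] := by
          rw [List.map_append, PySem.Set.ofList_eq_foldl, List.foldl_append, ← PySem.Set.ofList_eq_foldl]
          simp [PySem.Set.add, PySem.Set.contains, hxS]
        have hSsorted : PySem.List.sorted (PySem.Set.ofList (l.map (fun p => p.1)) ++ [x.1]) (fun k => k) true
            = PySem.List.insertBy (fun a b => decide (b < a)) x.1
                (PySem.List.sorted (PySem.Set.ofList (l.map (fun p => p.1))) (fun k => k) true) := by
          rw [PySem.List.sorted_rev_eq_foldl_insertBy, PySem.List.sorted_rev_eq_foldl_insertBy, List.foldl_append]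
          rfl
        rw [hadd, hSsorted,
          pv_insert_new x _ _ hks_sort hne hhom (fun hmem => hx ((hmemks x.1).mp hmem))]
        apply List.flatMap_congr
        intro h hh
        rcases (PySem.List.mem_insertBy _ _ _ _).mp hh with he | hmem
        · have hnil : l.filter (fun p => p.1 == x.1) = [] := by
            rw [List.filter_eq_nil_iff]
            intro p hp hpe
            exact hx (List.mem_map.mpr ⟨p, hp, by simpa using hpe⟩)
          rw [if_pos he, he, List.filter_append, hnil, List.filter_singleton]
          simp
        · have hne' : h ≠ x.1 := fun he => hx ((hmemks x.1).mp (he ▸ hmem))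
          have hbe : (x.1 == h) = false := by simp; omega
          rw [List.filter_append, List.filter_singleton, if_neg hne']
          simp [hbe]

theorem pv_pairs_eq (names : List String) (heights : List Int) (h : names.length ≤ heights.length) :
    (PySem.List.pyRange 0 (PySem.List.len names) 1).map
        (fun i => (PySem.List.pyGetD heights i 0, PySem.List.pyGetD names i ""))
      = List.zip heights names := by
  have hr : PySem.List.pyRange 0 (PySem.List.len names) 1 = (List.range names.length).map Int.ofNat := by
    simpa [PySem.List.len] using PySem.List.pyRange_zero_natCast names.length
  rw [hr, List.map_map]
  apply List.ext_getElem
  · simp [List.length_zip]; omega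
  · intro i h1 h2
    simp only [List.getElem_map, List.getElem_range, Function.comp_apply, List.getElem_zip]
    have hi : i < names.length := by simpa using h1
    have e1 : PySem.List.pyGetD heights (Int.ofNat i) 0 = heights[i] := by
      rw [show (Int.ofNat i) = ((i:Nat):Int) from rfl, PySem.List.pyGetD_natCast,
        List.getD_eq_getElem _ _ (by omega)]
    have e2 : PySem.List.pyGetD names (Int.ofNat i) "" = names[i] := by
      rw [show (Int.ofNat i) = ((i:Nat):Int) from rfl, PySem.List.pyGetD_natCast,
        List.getD_eq_getElem _ _ (by omega)]
    rw [e1, e2]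

theorem pv_grouped_snd (l : List (Int × String)) :
    (PySem.List.sorted l (fun p => p.1) true).map (fun p => p.2)
      = (PySem.List.sorted (PySem.Set.ofList (l.map (fun p => p.1))) (fun k => k) true).flatMap
          (fun h => (l.filter (fun p => p.1 == h)).map (fun p => p.2)) := by
  rw [pv_grouped, List.map_flatMap]

-- the write-back loop: writing the pairs into positions 0,1,… of lists at least that long
-- leaves, in the names component, the pairs' names followed by the untouched tail
theorem pv_writeback {α : Type} (l : List (Int × α)) :
    ∀ (k : Nat) (hs : List Int) (ns : List α), k + l.length ≤ ns.length →
    (l.foldl (fun (st : Nat × List Int × List α) p =>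
        (st.1 + 1, st.2.1.set st.1 p.1, st.2.2.set st.1 p.2)) (k, hs, ns)).2.2
      = ns.take k ++ l.map (·.2) ++ ns.drop (k + l.length) := by
  induction l with
  | nil => intro k hs ns _; simp
  | cons p l ih =>
      intro k hs ns hlen
      simp only [List.foldl_cons, List.length_cons] at *
      have hk : k < ns.length := by omega
      have hset : ns.set k p.2 = ns.take k ++ p.2 :: ns.drop (k + 1) := by
        rw [List.set_eq_take_append_cons_drop]; simp [hk]
      rw [ih (k + 1) _ _ (by simp; omega)]
      rw [hset]
      have hlt : (ns.take k).length = k := by simp [List.length_take]; omega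
      rw [List.take_append, List.drop_append, hlt]
      have e1 : k + 1 - k = 1 := by omega
      have e2 : k + 1 + l.length - k = l.length + 1 := by omega
      have t1 : List.take (k + 1) (List.take k ns) = List.take k ns :=
        List.take_of_length_le (by rw [hlt]; omega)
      have d1 : List.drop (k + 1 + l.length) (List.take k ns) = [] :=
        List.drop_eq_nil_of_le (by rw [hlt]; omega)
      rw [e1, e2, t1, d1, List.drop_succ_cons, List.drop_drop]
      have e3 : k + 1 + l.length = k + (l.length + 1) := by omega
      rw [e3]
      simp

-- ===== VERDICT =====
theorem sortPeople_spec : Claim_equal_sortPeople := by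
  intro names heights _ hpre
  unfold Pre_sortPeople at hpre
  unfold Spec_sortPeople
  have hzlen : (List.zip heights names).length = names.length := by
    rw [List.length_zip]; omega
  have hFMlen :
      ((PySem.List.sorted (PySem.Set.ofList ((List.zip heights names).map (fun p => p.1))) (fun k => k) true).flatMap
          (fun h => ((List.zip heights names).filter (fun p => p.1 == h)).map (fun p => p.2))).length
        = names.length := by
    rw [← pv_grouped_snd, List.length_map, PySem.List.length_sorted, hzlen]
  have hA : sortPeople names heights
      = (PySem.List.sorted (PySem.Set.ofList ((List.zip heights names).map (fun p => p.1))) (fun k => k) true).flatMap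
          (fun h => ((List.zip heights names).filter (fun p => p.1 == h)).map (fun p => p.2)) := by
    unfold sortPeople
    simp only [PySem.List.foldl_append_singleton_eq_map, List.nil_append]
    rw [pv_pairs_eq names heights hpre]
    rw [pv_writeback _ 0 heights names
      (by rw [PySem.List.length_sorted, hzlen]; omega)]
    rw [pv_grouped_snd]
    simp only [List.take_zero, List.nil_append, Nat.zero_add,
      PySem.List.length_sorted, hzlen, List.drop_length, List.append_nil]
  have hkeys : ((List.zip heights names).foldl
        (fun d p => d.modify p.1 [] (fun v => v ++ [p.2])) PySem.Dict.empty).keys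
      = PySem.Set.ofList ((List.zip heights names).map (fun p => p.1)) := by
    rw [PySem.Dict.keys_foldl_modify_key (List.zip heights names) (fun p => p.1) []
      (fun _ p => fun v => v ++ [p.2]) PySem.Dict.empty]
    rw [PySem.Set.ofList_eq_foldl]
    rfl
  have hget : ∀ c, ((List.zip heights names).foldl
        (fun d p => d.modify p.1 [] (fun v => v ++ [p.2])) PySem.Dict.empty).getD c []
      = ((List.zip heights names).filter (fun p => p.1 == c)).map (fun p => p.2) := by
    intro c
    have := PySem.Dict.getD_foldl_modify_append (List.zip heights names) PySem.Dict.empty c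
    simpa using this
  have hB : sortPeople_alt names heights
      = ((PySem.List.sorted (PySem.Set.ofList ((List.zip heights names).map (fun p => p.1))) (fun k => k) true).flatMap
          (fun h => ((List.zip heights names).filter (fun p => p.1 == h)).map (fun p => p.2)))
        ++ names.drop names.length := by
    unfold sortPeople_alt
    simp only [PySem.List.foldl_append_eq_flatMap, List.nil_append, hkeys, hget, hFMlen]
  rw [hA, hB, List.drop_length, List.append_nil]
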